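-- pv_equiv track=rewrite | github.com/neeraj-r-rugi/PESU-FILES | 1st-Sem-Chem-Cycle/Subject_Files/Python/Student_material/PCPS_Theory_Level1_Problems_with_solution/Batch_3_Wednesday/wednesday_level1_agriculture_production_analysis.py | total_revenue_by_region
-- ===== SOURCE A (Python) =====
-- def total_revenue_by_region(data):
--     revenue_by_region = {}
--     for row in data:
--         region = row[2]
--         revenue = row[3] * row[4]  # Production * Price
--         if region not in revenue_by_region:
--             revenue_by_region[region] = 0
--         revenue_by_region[region] += revenue
--     return revenue_by_region
-- ===== SOURCE B (Python) =====
-- def total_revenue_by_region(data):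
--     regions = dict.fromkeys(row[2] for row in data)
--     return {r: sum(row[3] * row[4] for row in data if row[2] == r) for r in regions}
-- ===== Notes on version B (the rewrite author's own statement) =====
-- stated objective: alternative
-- what changed: Instead of one accumulating pass over an updating dict, B first collects the distinct regions (in first-occurrence order) and then computes each region's total with a separate generator-sum pass over the data.
import Mathlib
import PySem

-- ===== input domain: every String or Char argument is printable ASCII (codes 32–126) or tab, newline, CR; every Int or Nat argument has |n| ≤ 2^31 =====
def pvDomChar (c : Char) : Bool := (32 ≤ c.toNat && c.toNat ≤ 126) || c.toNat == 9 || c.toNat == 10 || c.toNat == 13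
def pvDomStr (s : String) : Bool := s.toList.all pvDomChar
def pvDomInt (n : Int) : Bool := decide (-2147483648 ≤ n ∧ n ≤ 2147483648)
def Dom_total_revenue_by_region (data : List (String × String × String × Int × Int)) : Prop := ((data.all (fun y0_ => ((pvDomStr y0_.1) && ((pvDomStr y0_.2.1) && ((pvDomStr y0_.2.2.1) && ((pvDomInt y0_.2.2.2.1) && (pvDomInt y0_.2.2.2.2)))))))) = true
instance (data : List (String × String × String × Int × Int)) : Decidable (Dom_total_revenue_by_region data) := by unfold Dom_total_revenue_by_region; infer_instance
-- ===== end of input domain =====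

-- B replaces A's single accumulating pass over an updating dict by a key-discovery pass
-- (distinct regions in first-occurrence order) followed by one summing pass per region;
-- alternative decomposition, not faster.

-- ===== PORT A =====
-- one fold step = one iteration of A's for-loop over the dict accumulator
def pvStepA (d : PySem.Dict String Int) (row : String × String × String × Int × Int) : PySem.Dict String Int :=
  let region := row.2.2.1
  let revenue := row.2.2.2.1 * row.2.2.2.2
  let d1 := if d.contains region then d else d.insert region 0
  d1.insert region (d1.getD region 0 + revenue)

def total_revenue_by_region (data : List (String × String × String × Int × Int)) : List (String × Int) :=
  (data.foldl pvStepA PySem.Dict.empty).items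

-- ===== PORT B =====
def pvRegion (row : String × String × String × Int × Int) : String := row.2.2.1
def pvRevenue (row : String × String × String × Int × Int) : Int := row.2.2.2.1 * row.2.2.2.2
-- sum(row[3]*row[4] for row in data if row[2] == r)
def pvRegionSum (data : List (String × String × String × Int × Int)) (r : String) : Int :=
  ((data.filter (fun row => pvRegion row == r)).map pvRevenue).sum

def total_revenue_by_region_alt (data : List (String × String × String × Int × Int)) : List (String × Int) :=
  (PySem.List.dedup (data.map pvRegion)).map (fun r => (r, pvRegionSum data r))

-- ===== PRECONDITION & SPEC =====
def Spec_total_revenue_by_region (data : List (String × String × String × Int × Int)) (out : List (String × Int)) : Prop := out = total_revenue_by_region_alt data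
instance (data : List (String × String × String × Int × Int)) (out : List (String × Int)) : Decidable (Spec_total_revenue_by_region data out) := by unfold Spec_total_revenue_by_region; infer_instance

-- ===== CLAIM (what is proved, stated in full; the proofs are below) =====
def Claim_equal_total_revenue_by_region : Prop := ∀ (data : List (String × String × String × Int × Int)), Dom_total_revenue_by_region data → Spec_total_revenue_by_region data (total_revenue_by_region data)

-- ===== LEMMAS AND PROOFS =====

theorem pvRegionSum_append_singleton (l : List (String × String × String × Int × Int)) (x : String × String × String × Int × Int) (r : String) :
    pvRegionSum (l ++ [x]) r = pvRegionSum l r + (if pvRegion x == r then pvRevenue x else 0) := by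
  simp only [pvRegionSum, List.filter_append]
  by_cases h : pvRegion x = r <;> simp [h]

theorem pvRegionSum_of_not_mem (l : List (String × String × String × Int × Int)) (r : String)
    (h : r ∉ l.map pvRegion) : pvRegionSum l r = 0 := by
  have : l.filter (fun row => pvRegion row == r) = [] := by
    rw [List.filter_eq_nil_iff]
    intro a ha hr
    exact h (List.mem_map.mpr ⟨a, ha, by simpa using hr⟩)
  simp [pvRegionSum, this]

theorem pv_key_invariant (l : List (String × String × String × Int × Int)) :
    (l.foldl pvStepA PySem.Dict.empty).items
      = (PySem.List.dedup (l.map pvRegion)).map (fun r => (r, pvRegionSum l r)) := by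
  induction l using List.reverseRecOn with
  | nil => rfl
  | append_singleton l x ih =>
    have hnodup : (PySem.List.dedup (l.map pvRegion)).Nodup := PySem.List.nodup_dedup _
    set d := l.foldl pvStepA PySem.Dict.empty with hd
    have hkeys : d.keys = PySem.List.dedup (l.map pvRegion) := by
      simp only [PySem.Dict.keys, ih, List.map_map]
      simp [Function.comp_def]
    have hkn : d.keys.Nodup := by rw [hkeys]; exact hnodup
    have hfold : ((l ++ [x]).foldl pvStepA PySem.Dict.empty) = pvStepA d x := by
      simp [List.foldl_append, hd]
    have hded : PySem.List.dedup ((l ++ [x]).map pvRegion)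
        = PySem.Set.add (PySem.List.dedup (l.map pvRegion)) (pvRegion x) := by
      simp only [List.map_append, PySem.List.dedup_eq_ofList, PySem.Set.ofList_eq_foldl,
        List.foldl_append]
      simp
    have hcont : d.contains (pvRegion x) = decide (pvRegion x ∈ l.map pvRegion) := by
      rw [PySem.Dict.contains_eq_decide_mem_keys, hkeys]
      simp
    rw [hfold, hded]
    by_cases hmem : pvRegion x ∈ l.map pvRegion
    · -- region already seen: dict overwrites in place, dedup unchanged
      have hc : d.contains (pvRegion x) = true := hcont.trans (decide_eq_true hmem)
      have hmemded : pvRegion x ∈ PySem.List.dedup (l.map pvRegion) :=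
        (PySem.List.mem_dedup _ _).mpr hmem
      have hget : d.getD (pvRegion x) 0 = pvRegionSum l (pvRegion x) := by
        have hm : (pvRegion x, pvRegionSum l (pvRegion x)) ∈ d.items := by
          rw [ih]; exact List.mem_map.mpr ⟨pvRegion x, hmemded, rfl⟩
        exact PySem.Dict.getD_of_mem_items d hm hkn 0
      have hset : PySem.Set.add (PySem.List.dedup (l.map pvRegion)) (pvRegion x)
          = PySem.List.dedup (l.map pvRegion) := by
        have hcs : PySem.Set.contains (PySem.List.dedup (l.map pvRegion)) (pvRegion x) = true := by
          unfold PySem.Set.contains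
          exact List.elem_eq_true_of_mem hmemded
        simp only [PySem.Set.add]
        rw [if_pos hcs]
      rw [hset]
      have e1 : x.2.2.1 = pvRegion x := rfl
      have e2 : x.2.2.2.1 * x.2.2.2.2 = pvRevenue x := rfl
      simp only [pvStepA, e1, e2, hc, if_true]
      rw [PySem.Dict.items_insert_of_contains d _ hc, ih, hget, List.map_map]
      apply List.map_congr_left
      intro r _
      by_cases hr : r = pvRegion x
      · subst hr; simp [pvRegionSum_append_singleton]
      · simp [pvRegionSum_append_singleton, hr, Ne.symm hr]
    · -- fresh region: first insert appends (region, 0), second overwrites it with the revenue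
      have hc : d.contains (pvRegion x) = false := hcont.trans (decide_eq_false hmem)
      have hnotded : pvRegion x ∉ PySem.List.dedup (l.map pvRegion) :=
        fun h => hmem ((PySem.List.mem_dedup _ _).mp h)
      have hset : PySem.Set.add (PySem.List.dedup (l.map pvRegion)) (pvRegion x)
          = PySem.List.dedup (l.map pvRegion) ++ [pvRegion x] := by
        have hcs : PySem.Set.contains (PySem.List.dedup (l.map pvRegion)) (pvRegion x) = false := by
          unfold PySem.Set.contains
          exact (Bool.eq_false_iff).mpr (fun h => hnotded (List.mem_of_elem_eq_true h))
        simp only [PySem.Set.add]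
        rw [if_neg (by rw [hcs]; exact Bool.false_ne_true)]
      have hitems1 : (d.insert (pvRegion x) 0).items = d.items ++ [(pvRegion x, 0)] :=
        PySem.Dict.items_insert_of_not_contains d 0 hc
      have hget : (d.insert (pvRegion x) 0).getD (pvRegion x) 0 = 0 :=
        PySem.Dict.getD_insert_self d _ 0 0
      have hc1 : (d.insert (pvRegion x) 0).contains (pvRegion x) = true :=
        PySem.Dict.contains_insert_self d _ 0
      rw [hset]
      have e1 : x.2.2.1 = pvRegion x := rfl
      have e2 : x.2.2.2.1 * x.2.2.2.2 = pvRevenue x := rfl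
      simp only [pvStepA, e1, e2, hc, Bool.false_eq_true, if_false]
      rw [hget, PySem.Dict.items_insert_of_contains _ _ hc1, hitems1]
      rw [List.map_append, ih, List.map_map, List.map_append]
      congr 1
      · apply List.map_congr_left
        intro r hr
        have hrne : r ≠ pvRegion x := fun h => hnotded (h ▸ hr)
        simp [pvRegionSum_append_singleton, hrne, Ne.symm hrne]
      · simp [pvRegionSum_append_singleton, pvRegionSum_of_not_mem l _ hmem]

-- ===== VERDICT (by name: the statement is the Claim_ definition above) =====
theorem total_revenue_by_region_spec : Claim_equal_total_revenue_by_region := by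
  intro data _
  show total_revenue_by_region data = total_revenue_by_region_alt data
  rw [total_revenue_by_region, total_revenue_by_region_alt, pv_key_invariant]
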